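-- pv_equiv track=rewrite | github.com/keyrun-14/10x | 10xacademy/half_insertion.py | half_insertion
-- ===== SOURCE A (Python) =====
-- def half_insertion(str):
--     arr=[]
--     for ele in str:
--         arr.append(ele)
--     for index in range((len(arr)//2)+1,len(arr)):
--         key=arr[index]
--         prev_index=index-1
--         while prev_index>=(len(arr)//2) and key<arr[prev_index]:
--             arr[prev_index+1]=arr[prev_index]
--             prev_index=prev_index-1
--         arr[prev_index+1]=key
--     res="".join(arr)
--     return res
-- ===== SOURCE B (Python) =====
-- def half_insertion(str):
--     half = len(str) // 2
--     head, tail = str[:half], str[half:]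
--     counts = [0] * 128
--     for ch in tail:
--         counts[ord(ch)] += 1
--     pieces = []
--     for code in range(128):
--         pieces.append(chr(code) * counts[code])
--     return head + "".join(pieces)
-- ===== Notes on version B (the rewrite author's own statement) =====
-- stated objective: faster
-- what changed: Replaces A's in-place insertion sort of the second half (shifting loop with nested while) by a split into head/tail plus a single-pass counting sort of the tail over a 128-entry ASCII frequency table rebuilt in ascending code order.
import Mathlib
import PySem

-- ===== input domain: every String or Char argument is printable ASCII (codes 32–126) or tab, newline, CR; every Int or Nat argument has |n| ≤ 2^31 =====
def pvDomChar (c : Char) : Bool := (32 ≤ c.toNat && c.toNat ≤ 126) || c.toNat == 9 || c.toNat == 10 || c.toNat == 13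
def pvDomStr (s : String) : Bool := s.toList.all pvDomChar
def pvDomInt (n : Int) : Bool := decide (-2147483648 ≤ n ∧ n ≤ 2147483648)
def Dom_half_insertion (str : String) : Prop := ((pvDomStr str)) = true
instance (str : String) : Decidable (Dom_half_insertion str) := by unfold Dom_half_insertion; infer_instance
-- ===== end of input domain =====

-- B replaces A's in-place insertion sort of the second half (O(n^2)) by a one-pass
-- counting sort over ASCII codes (O(n + 128)); equivalence of the return values is proved below.

-- ===== PORT A =====
-- the inner 'while prev_index>=(len(arr)//2) and key<arr[prev_index]' loop of A
def innerA (a : List Char) (key : Char) (prev : Int) : List Char :=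
  if PySem.Int.floordiv (a.length : Int) 2 ≤ prev ∧ key < PySem.List.pyGetD a prev ' ' then
    innerA (a.set (prev + 1).toNat (PySem.List.pyGetD a prev ' ')) key (prev - 1)
  else
    a.set (prev + 1).toNat key
termination_by (prev + 1).toNat
decreasing_by
  rename_i h
  have h0 : (0 : Int) ≤ PySem.Int.floordiv (a.length : Int) 2 := by
    rw [PySem.Int.floordiv_eq_ediv_of_pos (by norm_num)]
    exact Int.ediv_nonneg (by positivity) (by norm_num)
  omega

-- indices in the loops are always in range on every input, so pyGetD/List.set return
-- exactly what Python's arr[i] / arr[i]=v compute (no IndexError is reachable)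
def half_insertion (str : String) : String :=
  let arr := str.toList.foldl (fun a e => a ++ [e]) ([] : List Char)
  let res := (PySem.List.pyRange (PySem.Int.floordiv (arr.length : Int) 2 + 1) (arr.length : Int) 1).foldl
    (fun a index => innerA a (PySem.List.pyGetD a index ' ') (index - 1)) arr
  String.mk res

-- ===== PORT B =====
def half_insertion_alt (str : String) : String :=
  let l := str.toList
  let half := l.length / 2
  let head := l.take half
  let tail := l.drop half
  let counts := tail.foldl (fun (c : List Nat) ch => c.set ch.toNat (c.getD ch.toNat 0 + 1)) (List.replicate 128 0)
  let pieces := (List.range 128).foldl (fun ps code => ps ++ [List.replicate (counts.getD code 0) (Char.ofNat code)]) []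
  String.mk (head ++ pieces.flatten)

-- ===== PRECONDITION & SPEC =====
def Spec_half_insertion (str : String) (out : String) : Prop := out = half_insertion_alt str
instance (str : String) (out : String) : Decidable (Spec_half_insertion str out) := by unfold Spec_half_insertion; infer_instance

-- ===== CLAIM (what is proved, stated in full; the proofs are below) =====
def Claim_equal_half_insertion : Prop := ∀ (str : String), Dom_half_insertion str → Spec_half_insertion str (half_insertion str)

-- ===== LEMMAS AND PROOFS =====

-- insert key from the right end of a list (what A's shifting while-loop computes)
def insRev (key : Char) : List Char → List Char
  | [] => [key]
  | a :: t => if key < a then a :: insRev key t else key :: a :: t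

def insertR (key : Char) (u : List Char) : List Char := (insRev key u.reverse).reverse

theorem insertR_nil (key : Char) : insertR key [] = [key] := rfl

theorem insertR_snoc (key a : Char) (u : List Char) :
    insertR key (u ++ [a]) = if key < a then insertR key u ++ [a] else u ++ [a, key] := by
  unfold insertR
  simp only [List.reverse_append, List.reverse_singleton, List.singleton_append, insRev]
  split
  · simp
  · simp

theorem insRev_perm (key : Char) (t : List Char) : (insRev key t).Perm (key :: t) := by
  induction t with
  | nil => simp [insRev]
  | cons a t ih =>
    simp only [insRev]
    split
    · exact ((ih.cons a).trans (List.Perm.swap key a t))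
    · exact List.Perm.refl _

theorem insertR_perm (key : Char) (u : List Char) : (insertR key u).Perm (key :: u) := by
  unfold insertR
  exact (List.reverse_perm _).trans ((insRev_perm key u.reverse).trans ((List.reverse_perm u).cons key))

theorem insertR_length (key : Char) (u : List Char) :
    (insertR key u).length = u.length + 1 := by
  have := (insertR_perm key u).length_eq
  simpa using this

theorem insRev_pairwise (key : Char) (t : List Char)
    (h : t.Pairwise (fun a b => b ≤ a)) : (insRev key t).Pairwise (fun a b => b ≤ a) := by
  induction t with
  | nil => simp [insRev]
  | cons a t ih =>
    rw [List.pairwise_cons] at h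
    simp only [insRev]
    split
    · rename_i hlt
      rw [List.pairwise_cons]
      refine ⟨?_, ih h.2⟩
      intro b hb
      have hb' : b = key ∨ b ∈ t := by
        have := (insRev_perm key t).mem_iff.mp hb
        simpa using this
      rcases hb' with rfl | hb'
      · exact le_of_lt hlt
      · exact h.1 b hb'
    · rename_i hge
      rw [List.pairwise_cons]
      refine ⟨?_, by rw [List.pairwise_cons]; exact h⟩
      intro b hb
      simp only [List.mem_cons] at hb
      rcases hb with rfl | hb
      · exact le_of_not_gt hge
      · exact le_trans (h.1 b hb) (le_of_not_gt hge)

theorem insertR_sorted (key : Char) (u : List Char)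
    (h : u.Pairwise (· ≤ ·)) : (insertR key u).Pairwise (· ≤ ·) := by
  unfold insertR
  rw [List.pairwise_reverse]
  exact insRev_pairwise key u.reverse (by rwa [List.pairwise_reverse])

theorem foldl_insertR_perm (t : List Char) : ∀ u : List Char,
    (t.foldl (fun acc k => insertR k acc) u).Perm (u ++ t) := by
  induction t with
  | nil => intro u; simp
  | cons x t ih =>
    intro u
    simp only [List.foldl_cons]
    exact (ih (insertR x u)).trans (((insertR_perm x u).append_right t).trans List.perm_middle.symm)

theorem foldl_insertR_sorted (t : List Char) : ∀ u : List Char,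
    u.Pairwise (· ≤ ·) → (t.foldl (fun acc k => insertR k acc) u).Pairwise (· ≤ ·) := by
  induction t with
  | nil => intro u hu; simpa using hu
  | cons x t ih =>
    intro u hu
    exact ih _ (insertR_sorted x u hu)

theorem fd_nat (n : Nat) : PySem.Int.floordiv (n : Int) 2 = ((n / 2 : Nat) : Int) := by
  rw [PySem.Int.floordiv_eq_ediv_of_pos (by norm_num)]
  omega

theorem set_at_len (hd : List Char) (x v : Char) (rest : List Char) :
    (hd ++ x :: rest).set hd.length v = hd ++ v :: rest := by
  induction hd with
  | nil => simp
  | cons a hd ih => simp [ih]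

theorem getD_at_len (hd : List Char) (x : Char) (rest : List Char) (d : Char) :
    PySem.List.pyGetD (hd ++ x :: rest) ((hd.length : Int)) d = x := by
  rw [PySem.List.pyGetD_natCast]
  rw [List.getD_eq_getElem?_getD, List.getElem?_append]
  simp

theorem innerA_spec (u : List Char) : ∀ (hd rest : List Char) (x key : Char),
    (hd.length + u.length + rest.length + 1) / 2 = hd.length →
    innerA (hd ++ u ++ x :: rest) key ((hd.length : Int) + (u.length : Int) - 1)
      = hd ++ insertR key u ++ rest := by
  induction u using List.reverseRecOn with
  | nil =>
    intro hd rest x key hh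
    simp only [List.length_nil, Nat.add_zero, Nat.cast_zero, List.append_nil] at hh ⊢
    rw [innerA]
    rw [if_neg]
    · have hidx : ((hd.length : Int) + 0 - 1 + 1).toNat = hd.length := by omega
      rw [hidx, set_at_len]
      simp [insertR_nil]
    · rintro ⟨hc, -⟩
      have hL : ((hd ++ x :: rest).length : Int) = ((hd.length + rest.length + 1 : Nat) : Int) := by
        simp only [List.length_append, List.length_cons]; push_cast; ring
      rw [hL, fd_nat] at hc
      omega
  | append_singleton u a ih =>
    intro hd rest x key hh
    simp only [List.length_append, List.length_cons, List.length_nil] at hh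
    have harr : hd ++ (u ++ [a]) ++ x :: rest = (hd ++ u) ++ a :: x :: rest := by simp
    have hprev : (hd.length : Int) + ((u ++ [a]).length : Int) - 1 = (((hd ++ u).length : Nat) : Int) := by
      simp only [List.length_append, List.length_cons, List.length_nil]; push_cast; ring
    rw [harr, hprev, innerA, getD_at_len]
    have hLnat : (((hd ++ u) ++ a :: x :: rest).length : Int)
        = ((hd.length + u.length + rest.length + 2 : Nat) : Int) := by
      simp only [List.length_append, List.length_cons]; push_cast; ring
    by_cases hka : key < a
    · rw [if_pos]
      · have h1 : ((((hd ++ u).length : Nat) : Int) + 1).toNat = ((hd ++ u) ++ [a]).length := by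
          simp only [List.length_append, List.length_cons, List.length_nil]; omega
        have h2 : (hd ++ u) ++ a :: x :: rest = ((hd ++ u) ++ [a]) ++ x :: rest := by simp
        rw [h1, h2, set_at_len]
        have harr2 : ((hd ++ u) ++ [a]) ++ a :: rest = hd ++ u ++ a :: (a :: rest) := by simp
        have hprev2 : (((hd ++ u).length : Nat) : Int) - 1 = (hd.length : Int) + (u.length : Int) - 1 := by
          simp only [List.length_append]; push_cast; ring
        rw [harr2, hprev2]
        rw [ih hd (a :: rest) a key (by simp only [List.length_cons]; omega)]
        rw [insertR_snoc, if_pos hka]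
        simp
      · refine ⟨?_, hka⟩
        rw [hLnat, fd_nat]
        simp only [List.length_append]
        omega
    · rw [if_neg]
      · have h1 : ((((hd ++ u).length : Nat) : Int) + 1).toNat = ((hd ++ u) ++ [a]).length := by
          simp only [List.length_append, List.length_cons, List.length_nil]; omega
        have h2 : (hd ++ u) ++ a :: x :: rest = ((hd ++ u) ++ [a]) ++ x :: rest := by simp
        rw [h1, h2, set_at_len, insertR_snoc, if_neg hka]
        simp
      · rintro ⟨-, hc⟩
        exact hka hc

theorem outer_spec (tl : List Char) : ∀ (u hd : List Char),
    ((hd ++ u ++ tl).length) / 2 = hd.length →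
    (PySem.List.pyRange ((hd.length : Int) + (u.length : Int)) (((hd ++ u ++ tl).length : Nat) : Int) 1).foldl
      (fun a index => innerA a (PySem.List.pyGetD a index ' ') (index - 1)) (hd ++ u ++ tl)
    = hd ++ tl.foldl (fun acc k => insertR k acc) u := by
  induction tl with
  | nil =>
    intro u hd hh
    rw [PySem.List.pyRange_one_eq_nil (by simp)]
    simp
  | cons x tl ih =>
    intro u hd hh
    have hlen : (((hd ++ u ++ x :: tl).length : Nat) : Int) = (hd.length : Int) + (u.length : Int) + (tl.length : Int) + 1 := by
      simp; omega
    rw [PySem.List.pyRange_one_cons (by rw [hlen]; omega)]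
    simp only [List.foldl_cons]
    have hkey : PySem.List.pyGetD (hd ++ u ++ x :: tl) ((hd.length : Int) + (u.length : Int)) ' ' = x := by
      have : (hd.length : Int) + (u.length : Int) = (((hd ++ u).length : Nat) : Int) := by simp
      rw [this]
      have : hd ++ u ++ x :: tl = (hd ++ u) ++ x :: tl := by simp
      rw [this, getD_at_len]
    rw [hkey]
    rw [innerA_spec u hd tl x x (by simp only [List.length_append, List.length_cons] at hh ⊢; omega)]
    have hstate : hd ++ insertR x u ++ tl = hd ++ (insertR x u) ++ tl := rfl
    have hlen' : (hd ++ insertR x u ++ tl).length = (hd ++ u ++ x :: tl).length := by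
      simp [insertR_length]; omega
    have hstart : (hd.length : Int) + (u.length : Int) + 1 = (hd.length : Int) + ((insertR x u).length : Int) := by
      rw [insertR_length]; push_cast; ring
    rw [hstart, ← hlen', ih (insertR x u) hd (by rw [hlen']; simpa using hh)]

-- characterisation of A: head kept, second half insertion-sorted
theorem A_char (str : String) :
    half_insertion str
      = String.mk (str.toList.take (str.toList.length / 2)
          ++ (str.toList.drop (str.toList.length / 2)).foldl (fun acc k => insertR k acc) []) := by
  unfold half_insertion
  rw [PySem.List.foldl_append_singleton_eq_self]
  simp only [List.nil_append]
  rcases htail : str.toList.drop (str.toList.length / 2) with _ | ⟨c, tl⟩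
  · -- second half empty: the string itself is empty
    have hlen0 : str.toList.length = 0 := by
      have := List.drop_eq_nil_iff.mp htail
      omega
    have hnil : str.toList = [] := List.eq_nil_of_length_eq_zero hlen0
    rw [hnil]
    rw [PySem.List.pyRange_one_eq_nil (by decide)]
    simp
  · set l := str.toList with hl
    set h := l.length / 2 with hh
    have hhl : h ≤ l.length := by omega
    have hsplit : l = l.take h ++ [c] ++ tl := by
      conv_lhs => rw [← List.take_append_drop h l]
      rw [htail]; simp
    have hlentake : (l.take h).length = h := by simp [List.length_take]; omega
    have H := outer_spec tl [c] (l.take h)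
      (by rw [← hsplit, hlentake])
    rw [← hsplit] at H
    rw [hlentake] at H
    simp only [List.length_cons, List.length_nil, Nat.cast_one, Nat.cast_add] at H
    have hstart : PySem.Int.floordiv (l.length : Int) 2 + 1 = (h : Int) + ((0 : Nat) + 1 : Int) := by
      rw [fd_nat, ← hh]; push_cast; ring
    rw [hstart, H]
    simp only [List.foldl_cons, insertR_nil]

-- counting-sort lemmas for B
theorem counts_spec (t : List Char) : ∀ (base : List Nat) (k : Nat), k < base.length →
    (t.foldl (fun (c : List Nat) ch => c.set ch.toNat (c.getD ch.toNat 0 + 1)) base).getD k 0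
      = base.getD k 0 + t.countP (fun c => c.toNat == k) := by
  induction t with
  | nil => intro base k hk; simp
  | cons ch t ih =>
    intro base k hk
    simp only [List.foldl_cons]
    rw [ih _ k (by simp [hk])]
    rw [List.countP_cons]
    by_cases hck : ch.toNat = k
    · subst hck
      rw [List.getD_eq_getElem?_getD (l := base), List.getD_eq_getElem?_getD (l := base.set _ _), List.getElem?_set]
      simp [hk]
      omega
    · rw [List.getD_eq_getElem?_getD (l := base.set _ _), List.getElem?_set, if_neg hck,
        ← List.getD_eq_getElem?_getD]
      simp [hck]

theorem B_char (str : String) :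
    half_insertion_alt str
      = String.mk (str.toList.take (str.toList.length / 2)
          ++ (List.range 128).flatMap (fun k =>
                List.replicate ((str.toList.drop (str.toList.length / 2)).countP (fun c => c.toNat == k)) (Char.ofNat k))) := by
  simp only [half_insertion_alt]
  rw [PySem.List.foldl_append_singleton_eq_map]
  simp only [List.nil_append]
  rw [List.flatMap_def]
  apply congrArg String.mk
  apply congrArg
  apply congrArg List.flatten
  apply List.map_congr_left
  intro k hk
  rw [List.mem_range] at hk
  rw [counts_spec _ _ k (by simp [hk])]
  have hbase : (List.replicate 128 (0 : Nat)).getD k 0 = 0 := by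
    rw [List.getD_eq_getElem?_getD, List.getElem?_replicate, if_pos hk]; rfl
  rw [hbase, Nat.zero_add]

theorem ofNat_le_ofNat {a b : Nat} (hab : a ≤ b) (hb : b < 128) : Char.ofNat a ≤ Char.ofNat b := by
  have ha : (Char.ofNat a).toNat = a := by
    rw [Char.toNat_ofNat, if_pos]; exact Or.inl (by omega)
  have hb' : (Char.ofNat b).toNat = b := by
    rw [Char.toNat_ofNat, if_pos]; exact Or.inl (by omega)
  rw [Char.le_def, UInt32.le_iff_toNat_le]
  show (Char.ofNat a).toNat ≤ (Char.ofNat b).toNat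
  omega

theorem out_sorted (m : Nat → Nat) : ∀ n, n ≤ 128 →
    ((List.range n).flatMap (fun k => List.replicate (m k) (Char.ofNat k))).Pairwise (· ≤ ·) := by
  intro n
  induction n with
  | zero => intro _; simp
  | succ n ih =>
    intro hn
    rw [List.range_succ, List.flatMap_append]
    rw [List.pairwise_append]
    refine ⟨ih (by omega), ?_, ?_⟩
    · simp only [List.flatMap_cons, List.flatMap_nil, List.append_nil]
      rw [List.pairwise_replicate]
      exact Or.inr le_rfl
    · intro x hx y hy
      simp only [List.mem_flatMap, List.mem_range, List.mem_replicate] at hx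
      simp only [List.flatMap_cons, List.flatMap_nil, List.append_nil, List.mem_replicate] at hy
      obtain ⟨k, hk, -, rfl⟩ := hx
      obtain ⟨-, rfl⟩ := hy
      exact ofNat_le_ofNat (by omega) (by omega)

theorem beq_char_toNat (a b : Char) : (a == b) = (a.toNat == b.toNat) := by
  by_cases hab : a = b
  · subst hab; simp
  · have : a.toNat ≠ b.toNat := by
      intro hco
      apply hab
      have := UInt32.toNat_inj.mp hco
      exact Char.ext this
    simp [hab, this]

theorem ofNat_eq_iff {k : Nat} (hk : k < 128) (c : Char) : Char.ofNat k = c ↔ k = c.toNat := by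
  constructor
  · rintro rfl
    rw [Char.toNat_ofNat, if_pos]; exact Or.inl (by omega)
  · rintro rfl
    exact Char.ofNat_toNat c

theorem count_out (t : List Char) (c : Char) : ∀ n, n ≤ 128 →
    ((List.range n).flatMap (fun k => List.replicate (t.countP (fun x => x.toNat == k)) (Char.ofNat k))).count c
      = if c.toNat < n then t.countP (fun x => x.toNat == c.toNat) else 0 := by
  intro n
  induction n with
  | zero => intro _; simp
  | succ n ih =>
    intro hn
    rw [List.range_succ, List.flatMap_append, List.count_append, ih (by omega)]
    simp only [List.flatMap_cons, List.flatMap_nil, List.append_nil]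
    rw [List.count_replicate]
    by_cases hcn : Char.ofNat n = c
    · have hkc : n = c.toNat := (ofNat_eq_iff (by omega) c).mp hcn
      simp only [hcn, beq_self_eq_true, if_pos]
      have : ¬ c.toNat < n := by omega
      rw [if_neg this, if_pos (by omega)]
      rw [← hkc]
      simp
    · have hne : (Char.ofNat n == c) = false := by simp [hcn]
      rw [hne]
      simp only [Bool.false_eq_true, if_false, Nat.add_zero]
      have hkc : n ≠ c.toNat := fun h => hcn ((ofNat_eq_iff (by omega) c).mpr h)
      by_cases hlt : c.toNat < n
      · rw [if_pos hlt, if_pos (by omega)]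
      · rw [if_neg hlt, if_neg (by omega)]

theorem out_perm (t : List Char) (ht : ∀ c ∈ t, c.toNat < 128) :
    ((List.range 128).flatMap (fun k => List.replicate (t.countP (fun x => x.toNat == k)) (Char.ofNat k))).Perm t := by
  rw [List.perm_iff_count]
  intro c
  rw [count_out t c 128 le_rfl]
  by_cases hc : c.toNat < 128
  · rw [if_pos hc]
    rw [List.count_eq_countP]
    apply List.countP_congr
    intro x hx
    rw [beq_char_toNat]
  · rw [if_neg hc]
    symm
    rw [List.count_eq_zero]
    intro hmem
    exact hc (ht c hmem)

theorem dom_chars (str : String) (hdom : Dom_half_insertion str) :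
    ∀ c ∈ str.toList, c.toNat < 128 := by
  intro c hc
  unfold Dom_half_insertion pvDomStr at hdom
  rw [List.all_eq_true] at hdom
  have := hdom c hc
  unfold pvDomChar at this
  simp only [Bool.or_eq_true, Bool.and_eq_true, decide_eq_true_eq, beq_iff_eq] at this
  omega

-- ===== VERDICT (by name: the statement is the Claim_ definition above) =====
theorem half_insertion_spec : Claim_equal_half_insertion := by
  intro str hdom
  unfold Spec_half_insertion
  rw [A_char, B_char]
  set l := str.toList with hl
  set h := l.length / 2 with hh
  set tail := l.drop h with htail
  congr 2
  have htc : ∀ c ∈ tail, c.toNat < 128 := by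
    intro c hc
    exact dom_chars str hdom c (List.mem_of_mem_drop hc)
  have hA : (tail.foldl (fun acc k => insertR k acc) []).Perm tail := by
    simpa using foldl_insertR_perm tail []
  have hB := out_perm tail htc
  apply List.Perm.eq_of_pairwise (le := (· ≤ ·))
  · intro a b _ _ hab hba
    exact le_antisymm hab hba
  · exact foldl_insertR_sorted tail [] (by simp)
  · exact out_sorted (fun k => tail.countP (fun c => c.toNat == k)) 128 le_rfl
  · exact hA.trans hB.symm
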